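-- pv_equiv track=rewrite | github.com/ihdavids/orgextended | orgbuiltinresources.py | sortMessages
-- ===== SOURCE A (Python) =====
-- def sortMessages(x):
--     r = x
--     xs = x.split('.')
--     if(len(xs) <= 1):
--         return 0
--     m = 1
--     c = 0
--     for i in range(len(xs)-1,-1,-1):
--         x = xs[i]
--         c = c+(int(x)*m)
--         m *= 100
--     return c
-- ===== SOURCE B (Python) =====
-- def sortMessages(x):
--     xs = x.split('.')
--     if len(xs) <= 1:
--         return 0
--     c = 0
--     for p in xs:
--         c = c * 100 + int(p)
--     return c
-- ===== Notes on version B (the rewrite author's own statement) =====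
-- stated objective: simpler
-- what changed: Replaces the backward indexed loop that maintains an explicit power-of-100 multiplier with a forward Horner pass over the parts (c = c*100 + int(p)), eliminating the multiplier variable and the reversed range.
import Mathlib
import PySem

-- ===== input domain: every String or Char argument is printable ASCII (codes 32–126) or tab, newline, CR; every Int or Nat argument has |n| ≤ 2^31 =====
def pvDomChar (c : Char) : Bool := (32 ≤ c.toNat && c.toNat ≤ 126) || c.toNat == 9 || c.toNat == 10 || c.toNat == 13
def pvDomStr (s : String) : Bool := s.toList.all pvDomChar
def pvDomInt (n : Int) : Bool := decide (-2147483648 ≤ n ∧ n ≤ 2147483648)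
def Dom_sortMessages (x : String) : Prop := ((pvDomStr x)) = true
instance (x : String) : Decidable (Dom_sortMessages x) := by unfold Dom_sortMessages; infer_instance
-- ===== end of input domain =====

-- B replaces A's backward indexed loop with an explicit multiplier by a forward Horner pass (simpler decomposition, same cost).

-- ===== PORT A =====
-- Literal port of A: x.split('.') is split? with the literal nonempty separator "." (always some; .getD [] never fires); early return 0 on <= 1 part, then loop i from len-1 down to 0
-- keeping (m, c); int(x) is ported as (PySem.Int.ofStr? _).getD 0, which agrees with Python
-- on every input admitted by Pre_ (where ofStr? is some).
def sortMessages (x : String) : Int :=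
  let xs := (PySem.Str.split? x ".").getD []
  if xs.length ≤ 1 then 0
  else
    let st := (PySem.List.pyRange ((xs.length : Int) - 1) (-1) (-1)).foldl
      (fun (mc : Int × Int) i =>
        let s := PySem.List.pyGetD xs i ""
        (mc.1 * 100, mc.2 + ((PySem.Int.ofStr? s).getD 0) * mc.1)) (1, 0)
    st.2

-- ===== PORT B =====
def sortMessages_alt (x : String) : Int :=
  let xs := (PySem.Str.split? x ".").getD []
  if xs.length ≤ 1 then 0
  else xs.foldl (fun c s => c * 100 + (PySem.Int.ofStr? s).getD 0) 0

-- ===== PRECONDITION & SPEC =====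
-- Pre_ excludes exactly the inputs where Python A raises ValueError: some part is not an
-- int literal and the loop is reached (more than one part).
def Pre_sortMessages (x : String) : Prop :=
  ((PySem.Str.split? x ".").getD []).length ≤ 1 ∨
    ∀ s ∈ (PySem.Str.split? x ".").getD [], (PySem.Int.ofStr? s).isSome = true
instance (x : String) : Decidable (Pre_sortMessages x) := by unfold Pre_sortMessages; infer_instance
def pvWitness_sortMessages : String := "1.2.3"
def Spec_sortMessages (x : String) (out : Int) : Prop := out = sortMessages_alt x
instance (x : String) (out : Int) : Decidable (Spec_sortMessages x out) := by unfold Spec_sortMessages; infer_instance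

-- ===== CLAIM (what is proved, stated in full; the proofs are below) =====
def Claim_equal_sortMessages : Prop := ∀ (x : String), Dom_sortMessages x → Pre_sortMessages x → Spec_sortMessages x (sortMessages x)

-- ===== LEMMAS AND PROOFS =====

-- value of a part, shared shorthand for the proofs
def pvVal (s : String) : Int := (PySem.Int.ofStr? s).getD 0

-- Horner fold shifted by an initial accumulator.
theorem horner_shift (l : List String) : ∀ (a : Int),
    l.foldl (fun c s => c * 100 + pvVal s) a
      = a * 100 ^ l.length + l.foldl (fun c s => c * 100 + pvVal s) 0 := by
  induction l with
  | nil => intro a; simp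
  | cons v t ih =>
    intro a
    simp only [List.foldl_cons, List.length_cons]
    rw [ih (a * 100 + pvVal v), ih (0 * 100 + pvVal v)]
    ring

-- A's loop over the reversed list computes c + m · (Horner of l).
theorem rev_horner (l : List String) : ∀ (m c : Int),
    (l.reverse.foldl
      (fun (mc : Int × Int) s => (mc.1 * 100, mc.2 + pvVal s * mc.1)) (m, c)).2
      = c + m * l.foldl (fun c s => c * 100 + pvVal s) 0 := by
  induction l with
  | nil => intro m c; simp
  | cons v t ih =>
    intro m c
    have hfst : ∀ (r : List String) (m c : Int),
        (r.foldl (fun (mc : Int × Int) s => (mc.1 * 100, mc.2 + pvVal s * mc.1)) (m, c)).1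
          = m * 100 ^ r.length := by
      intro r
      induction r with
      | nil => intro m c; simp
      | cons w u ihu => intro m c; simp only [List.foldl_cons, List.length_cons]; rw [ihu]; ring
    simp only [List.reverse_cons, List.foldl_append, List.foldl_cons, List.foldl_nil,
      List.foldl_cons]
    rw [ih m c]
    have h1 := hfst t.reverse m c
    -- rewrite the remaining first component
    rw [show (t.reverse.foldl
        (fun (mc : Int × Int) s => (mc.1 * 100, mc.2 + pvVal s * mc.1)) (m, c)).1
        = m * 100 ^ t.length by rw [h1, List.length_reverse]]
    rw [horner_shift t (0 * 100 + pvVal v)]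
    ring

-- ===== VERDICT (by name: the statement is the Claim_ definition above) =====
theorem sortMessages_spec : Claim_equal_sortMessages := by
  intro x _ _
  unfold Spec_sortMessages sortMessages sortMessages_alt
  set xs := (PySem.Str.split? x ".").getD [] with hxs
  by_cases h : xs.length ≤ 1
  · simp [h]
  · simp only [h, if_false]
    have hrange : PySem.List.pyRange ((xs.length : Int) - 1) (-1) (-1)
        = (PySem.List.pyRange 0 (xs.length : Int) 1).reverse := by
      rw [PySem.List.pyRange_neg_one_eq_reverse]
      norm_num
    rw [hrange]
    have hmap : ((PySem.List.pyRange 0 (xs.length : Int) 1).map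
        (fun i => PySem.List.pyGetD xs i "")) = xs :=
      PySem.List.map_pyGetD_pyRange_zero xs ""
    calc ((PySem.List.pyRange 0 (xs.length : Int) 1).reverse.foldl
            (fun (mc : Int × Int) i =>
              (mc.1 * 100, mc.2 + pvVal (PySem.List.pyGetD xs i "") * mc.1)) (1, 0)).2
        = (((PySem.List.pyRange 0 (xs.length : Int) 1).map
              (fun i => PySem.List.pyGetD xs i "")).reverse.foldl
            (fun (mc : Int × Int) s => (mc.1 * 100, mc.2 + pvVal s * mc.1)) (1, 0)).2 := by
          rw [← List.map_reverse, List.foldl_map]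
      _ = (xs.reverse.foldl
            (fun (mc : Int × Int) s => (mc.1 * 100, mc.2 + pvVal s * mc.1)) (1, 0)).2 := by
          rw [hmap]
      _ = xs.foldl (fun c s => c * 100 + pvVal s) 0 := by
          rw [rev_horner xs 1 0]; ring
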